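-- pv_equiv track=rewrite | github.com/pypi-data/pypi-mirror-397 | packages/instinct8-agent/instinct8_agent-0.4.5-py3-none-any.whl/evaluation/coding_metrics.py | _basic_syntax_check
-- ===== SOURCE A (Python) =====
-- def _basic_syntax_check(code: str) -> bool:
--     """Basic syntax check using bracket matching."""
--     brackets = {"(": ")", "[": "]", "{": "}"}
--     stack = []
--     in_string = False
--     string_char = None
--
--     for char in code:
--         if char in ('"', "'") and not in_string:
--             in_string = True
--             string_char = char
--         elif char == string_char and in_string:
--             in_string = False
--             string_char = None
--         elif not in_string:
--             if char in brackets: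
--                 stack.append(brackets[char])
--             elif char in brackets.values():
--                 if not stack or stack.pop() != char:
--                     return False
--
--     return len(stack) == 0
-- ===== SOURCE B (Python) =====
-- def _basic_syntax_check(code: str) -> bool:
--     """Basic syntax check using bracket matching (two passes: strip strings, then stack)."""
--     # Pass 1: collect the characters outside string literals (quotes excluded).
--     relevant = []
--     in_string = False
--     string_char = None
--     for char in code:
--         if not in_string:
--             if char in ('"', "'"):
--                 in_string = True
--                 string_char = char
--             else:
--                 relevant.append(char)
--         elif char == string_char:
--             in_string = False
--             string_char = None
--     # Pass 2: push the expected closer, match on closing brackets.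
--     closers = {"(": ")", "[": "]", "{": "}"}
--     stack = []
--     for char in relevant:
--         if char in closers:
--             stack.append(closers[char])
--         elif char in (")", "]", "}"):
--             if not stack or stack.pop() != char:
--                 return False
--     return not stack
-- ===== Notes on version B (the rewrite author's own statement) =====
-- stated objective: alternative
-- what changed: A interleaves the string state machine and the bracket stack in one loop with a three-way branch chain; B decomposes into two passes: first filter out string-literal content (and the quotes) with only the string state machine, then run a plain stack check over the filtered characters.
import Mathlib
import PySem

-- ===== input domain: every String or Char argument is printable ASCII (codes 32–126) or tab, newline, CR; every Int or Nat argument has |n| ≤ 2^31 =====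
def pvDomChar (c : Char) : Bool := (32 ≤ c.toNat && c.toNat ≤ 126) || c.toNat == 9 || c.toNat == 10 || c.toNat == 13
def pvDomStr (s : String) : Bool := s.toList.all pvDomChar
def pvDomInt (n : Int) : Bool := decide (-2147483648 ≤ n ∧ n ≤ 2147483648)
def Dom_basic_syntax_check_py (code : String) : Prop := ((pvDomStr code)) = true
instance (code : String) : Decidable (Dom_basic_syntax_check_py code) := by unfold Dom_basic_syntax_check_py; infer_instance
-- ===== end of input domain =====

-- B splits A's single interleaved loop into two passes (strip string literals, then a plain
-- stack check); same O(n) cost, different decomposition.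

-- ===== PORT A =====
-- A's dict lookup `brackets[char]` / membership `char in brackets`
def pyBracketsA (c : Char) : Option Char :=
  if c = '(' then some ')' else if c = '[' then some ']' else if c = '{' then some '}' else none

-- A's single loop over the characters: state = (stack, in_string, string_char)
def aLoop : List Char → List Char → Bool → Option Char → Bool
  | [], stack, _, _ => stack.isEmpty
  | c :: cs, stack, ins, sc =>
    if (c = '"' ∨ c = '\'') ∧ ins = false then aLoop cs stack true (some c)
    else if sc = some c ∧ ins = true then aLoop cs stack false none
    else if ins = false then
      match pyBracketsA c with
      | some close => aLoop cs (close :: stack) ins sc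
      | none =>
        if c = ')' ∨ c = ']' ∨ c = '}' then
          match stack with
          | [] => false
          | top :: rest => if top = c then aLoop cs rest ins sc else false
        else aLoop cs stack ins sc
    else aLoop cs stack ins sc

def basic_syntax_check_py (code : String) : Bool := aLoop code.toList [] false none

-- ===== PORT B =====
-- Pass 1: keep the characters outside string literals (quotes excluded)
def bFilter : List Char → Bool → Option Char → List Char
  | [], _, _ => []
  | c :: cs, ins, sc =>
    if ins = false then
      if c = '"' ∨ c = '\'' then bFilter cs true (some c)
      else c :: bFilter cs ins sc
    else if sc = some c then bFilter cs false none
    else bFilter cs ins sc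

-- B's dict lookup `closers[char]` / membership `char in closers`
def bClosers (c : Char) : Option Char :=
  if c = '(' then some ')' else if c = '[' then some ']' else if c = '{' then some '}' else none

-- Pass 2: plain stack check
def bLoop : List Char → List Char → Bool
  | [], stack => stack.isEmpty
  | c :: cs, stack =>
    match bClosers c with
    | some close => bLoop cs (close :: stack)
    | none =>
      if c = ')' ∨ c = ']' ∨ c = '}' then
        match stack with
        | [] => false
        | top :: rest => if top = c then bLoop cs rest else false
      else bLoop cs stack

def basic_syntax_check_py_alt (code : String) : Bool :=
  bLoop (bFilter code.toList false none) []

-- ===== PRECONDITION & SPEC =====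
def Spec_basic_syntax_check_py (code : String) (out : Bool) : Prop := out = basic_syntax_check_py_alt code
instance (code : String) (out : Bool) : Decidable (Spec_basic_syntax_check_py code out) := by unfold Spec_basic_syntax_check_py; infer_instance

-- ===== CLAIM (what is proved, stated in full; the proofs are below) =====
def Claim_equal_basic_syntax_check_py : Prop := ∀ (code : String), Dom_basic_syntax_check_py code → Spec_basic_syntax_check_py code (basic_syntax_check_py code)

-- ===== LEMMAS AND PROOFS =====
theorem aLoop_eq_bLoop_bFilter (cs : List Char) :
    ∀ (stack : List Char) (ins : Bool) (sc : Option Char),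
      aLoop cs stack ins sc = bLoop (bFilter cs ins sc) stack := by
  induction cs with
  | nil => intro stack ins sc; simp [aLoop, bFilter, bLoop]
  | cons c cs ih =>
    intro stack ins sc
    cases ins with
    | false =>
      by_cases hq : c = '"' ∨ c = '\''
      · simp [aLoop, bFilter, hq, ih]
      · have hf : bFilter (c :: cs) false sc = c :: bFilter cs false sc := by
          simp [bFilter, hq]
        have ha : aLoop (c :: cs) stack false sc =
            (match pyBracketsA c with
              | some close => aLoop cs (close :: stack) false sc
              | none =>
                if c = ')' ∨ c = ']' ∨ c = '}' then
                  match stack with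
                  | [] => false
                  | top :: rest => if top = c then aLoop cs rest false sc else false
                else aLoop cs stack false sc) := by
          rw [aLoop.eq_def]; simp [hq]
        rw [hf, ha, show pyBracketsA = bClosers from rfl]
        conv_rhs => rw [bLoop.eq_def]
        cases hb : bClosers c with
        | some close => simp [hb, ih]
        | none =>
          by_cases hc : c = ')' ∨ c = ']' ∨ c = '}'
          · cases stack with
            | nil => simp [hb, hc]
            | cons top rest => by_cases ht : top = c <;> simp [hb, hc, ht, ih]
          · simp [hb, hc, ih]
    | true =>
      by_cases hs : sc = some c
      · simp [aLoop, bFilter, hs, ih]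
      · have : ¬ (sc = some c ∧ (true : Bool) = true) := by simp [hs]
        simp [aLoop, bFilter, hs, ih]

-- ===== VERDICT (by name: the statement is the Claim_ definition above) =====
theorem basic_syntax_check_py_spec : Claim_equal_basic_syntax_check_py := by
  intro code _
  show basic_syntax_check_py code = basic_syntax_check_py_alt code
  simp [basic_syntax_check_py, basic_syntax_check_py_alt, aLoop_eq_bLoop_bFilter]
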